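-- pv_equiv track=rewrite | github.com/Adib-Ishraq/CSE221-ALGORITHMS | LAB 4 - BFS DFS/task6.py | max_diamond
-- ===== SOURCE A (Python) =====
-- def flood(edges, r, c, row, col):
--     if r < 0 or c < 0 or r >= row or c >= col or edges[r][c] == "#" or edges[r][c] == "Y":
--         return 0
--     count = 0
--     if edges[r][c] == "D":
--         count = 1
--     edges[r][c] = "Y"
--     count += flood(edges, r + 1, c, row, col)
--     count += flood(edges, r - 1, c, row, col)
--     count += flood(edges, r, c + 1, row, col)
--     count += flood(edges, r, c - 1, row, col)
--     return count
--
-- def max_diamond(edges, row, col):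
--     max_diamond_collected = 0
--     for i in range(row):
--         for j in range(col):
--             if edges[i][j] == ".":
--                 diamond_collected = flood(edges, i, j, row, col)
--                 max_diamond_collected = max(diamond_collected, max_diamond_collected)
--     return max_diamond_collected
-- ===== SOURCE B (Python) =====
-- def max_diamond(edges, row, col):
--     max_diamond_collected = 0
--     for i in range(row):
--         for j in range(col):
--             if edges[i][j] == ".":
--                 count = 0
--                 stack = [(i, j)]
--                 while stack:
--                     r, c = stack.pop()
--                     if r < 0 or c < 0 or r >= row or c >= col:
--                         continue
--                     cell = edges[r][c]
--                     if cell == "#" or cell == "Y":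
--                         continue
--                     if cell == "D":
--                         count += 1
--                     edges[r][c] = "Y"
--                     stack.append((r, c - 1))
--                     stack.append((r, c + 1))
--                     stack.append((r - 1, c))
--                     stack.append((r + 1, c))
--                 max_diamond_collected = max(count, max_diamond_collected)
--     return max_diamond_collected
-- ===== Notes on version B (the rewrite author's own statement) =====
-- stated objective: alternative
-- what changed: The recursive flood fill is replaced by an iterative DFS with an explicit stack (pop a cell, guard, count, mark, push the four neighbours), removing Python's recursion; the seeding double loop and the in-place mutation of edges are preserved.
import Mathlib
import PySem

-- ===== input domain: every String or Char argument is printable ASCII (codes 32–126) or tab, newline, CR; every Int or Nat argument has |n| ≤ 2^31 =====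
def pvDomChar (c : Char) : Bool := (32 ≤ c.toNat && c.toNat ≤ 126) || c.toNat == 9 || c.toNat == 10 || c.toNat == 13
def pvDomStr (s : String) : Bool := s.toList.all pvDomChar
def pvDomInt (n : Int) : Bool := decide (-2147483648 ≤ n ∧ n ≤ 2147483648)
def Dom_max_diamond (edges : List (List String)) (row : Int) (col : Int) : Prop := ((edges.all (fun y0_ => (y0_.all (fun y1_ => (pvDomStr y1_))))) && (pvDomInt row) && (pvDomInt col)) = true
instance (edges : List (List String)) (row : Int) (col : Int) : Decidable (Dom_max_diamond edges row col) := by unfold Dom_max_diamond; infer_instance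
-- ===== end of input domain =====

-- B replaces A's recursive flood fill by an iterative DFS with an explicit stack (same seeding
-- double loop, same in-place marking of reached cells as "Y"); equivalence is about the return
-- value, and B's Python performs the identical mutation of `edges` as A's.

-- ===== PORT A =====
-- shared accessors: edges[r][c] and the assignment edges[r][c] = v (indices are checked ≥ 0
-- and < row/col before every use; the defaults are never reached inside Pre_)
def pvCell (g : List (List String)) (r c : Int) : String :=
  PySem.List.pyGetD (PySem.List.pyGetD g r []) c ""

def pvSetCell (g : List (List String)) (r c : Int) (v : String) : List (List String) :=
  PySem.List.pySetD g r (PySem.List.pySetD (PySem.List.pyGetD g r []) c v)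

-- fuel bound: the recursion depth (resp. per-branch depth of B's stack) is at most one more
-- than the number of cells, since every deeper call first marks a fresh cell "Y"
def pvFuel (row col : Int) : Nat := row.toNat * col.toNat + 2

-- A's flood: literal recursive transliteration, guarded by fuel (fuel only makes it total;
-- it is never exhausted on inputs satisfying Pre_). Returns (count, updated grid).
def floodA (fuel : Nat) (g : List (List String)) (r c row col : Int) :
    Option (Int × List (List String)) :=
  match fuel with
  | 0 => none
  | fuel + 1 =>
    if r < 0 ∨ c < 0 ∨ r ≥ row ∨ c ≥ col ∨ pvCell g r c = "#" ∨ pvCell g r c = "Y" then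
      some (0, g)
    else
      let count : Int := if pvCell g r c = "D" then 1 else 0
      let g0 := pvSetCell g r c "Y"
      (floodA fuel g0 (r + 1) c row col).bind (fun p1 =>
      (floodA fuel p1.2 (r - 1) c row col).bind (fun p2 =>
      (floodA fuel p2.2 r (c + 1) row col).bind (fun p3 =>
      (floodA fuel p3.2 r (c - 1) row col).bind (fun p4 =>
      some (count + p1.1 + p2.1 + p3.1 + p4.1, p4.2)))))

def max_diamond (edges : List (List String)) (row : Int) (col : Int) : Int :=
  ((PySem.List.pyRange 0 row 1).foldl (fun st i =>
    (PySem.List.pyRange 0 col 1).foldl (fun st2 j =>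
      if pvCell st2.2 i j = "." then
        match floodA (pvFuel row col) st2.2 i j row col with
        | some p => (max p.1 st2.1, p.2)
        | none => st2
      else st2) st) ((0 : Int), edges)).1

-- ===== PORT B =====
-- B's flood: explicit stack (head = top). Each pushed entry carries its depth fuel
-- (totality scaffolding only; never exhausted inside Pre_).
def floodB (g : List (List String)) (row col : Int)
    (stack : List (Nat × Int × Int)) (acc : Int) : Option (Int × List (List String)) :=
  match stack with
  | [] => some (acc, g)
  | (0, _, _) :: _ => none
  | (f + 1, r, c) :: rest =>
    if r < 0 ∨ c < 0 ∨ r ≥ row ∨ c ≥ col then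
      floodB g row col rest acc
    else
      let cell := pvCell g r c
      if cell = "#" ∨ cell = "Y" then
        floodB g row col rest acc
      else
        let acc' := if cell = "D" then acc + 1 else acc
        floodB (pvSetCell g r c "Y") row col
          ((f, r + 1, c) :: (f, r - 1, c) :: (f, r, c + 1) :: (f, r, c - 1) :: rest) acc'
  termination_by (stack.map (fun e => 5 ^ e.1)).sum
  decreasing_by
  · simp only [List.map_cons, List.sum_cons]
    have h5 : 0 < 5 ^ (f + 1) := pow_pos (by omega) _
    omega
  · simp only [List.map_cons, List.sum_cons]
    have h5 : 0 < 5 ^ (f + 1) := pow_pos (by omega) _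
    omega
  · simp only [List.map_cons, List.sum_cons, pow_succ]
    have h5 : 0 < 5 ^ f := pow_pos (by omega) _
    omega

def max_diamond_alt (edges : List (List String)) (row : Int) (col : Int) : Int :=
  ((PySem.List.pyRange 0 row 1).foldl (fun st i =>
    (PySem.List.pyRange 0 col 1).foldl (fun st2 j =>
      if pvCell st2.2 i j = "." then
        match floodB st2.2 row col [(pvFuel row col, i, j)] 0 with
        | some p => (max p.1 st2.1, p.2)
        | none => st2
      else st2) st) ((0 : Int), edges)).1

-- ===== PRECONDITION & SPEC =====
-- Pre_ excludes exactly the inputs where the Python A raises IndexError: a positive row/col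
-- loop range reaching past the actual grid (row > len(edges), or some of the first `row`
-- rows shorter than col).
def Pre_max_diamond (edges : List (List String)) (row : Int) (col : Int) : Prop :=
  row ≤ 0 ∨ col ≤ 0 ∨ (row ≤ edges.length ∧ ∀ l ∈ edges.take row.toNat, col ≤ l.length)
instance (edges : List (List String)) (row : Int) (col : Int) : Decidable (Pre_max_diamond edges row col) := by unfold Pre_max_diamond; infer_instance

def pvWitness_max_diamond : List (List String) × Int × Int := ([[".", "D"], ["D", "#"]], 2, 2)

def Spec_max_diamond (edges : List (List String)) (row : Int) (col : Int) (out : Int) : Prop := out = max_diamond_alt edges row col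
instance (edges : List (List String)) (row : Int) (col : Int) (out : Int) : Decidable (Spec_max_diamond edges row col out) := by unfold Spec_max_diamond; infer_instance

-- ===== CLAIM (what is proved, stated in full; the proofs are below) =====
def Claim_equal_max_diamond : Prop := ∀ (edges : List (List String)) (row : Int) (col : Int), Dom_max_diamond edges row col → Pre_max_diamond edges row col → Spec_max_diamond edges row col (max_diamond edges row col)

-- ===== LEMMAS AND PROOFS =====

-- Popping (f,r,c) off the stack performs exactly one recursive flood from (r,c) with depth
-- fuel f (producing the same count, grid and failure behaviour) and then continues with the
-- rest of the stack.
theorem floodB_cons (row col : Int) : ∀ (f : Nat) (g : List (List String)) (r c : Int)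
    (rest : List (Nat × Int × Int)) (acc : Int),
    floodB g row col ((f, r, c) :: rest) acc
      = (floodA f g r c row col).bind (fun p => floodB p.2 row col rest (acc + p.1)) := by
  intro f
  induction f with
  | zero => intro g r c rest acc; simp [floodA, floodB]
  | succ f ih =>
    intro g r c rest acc
    by_cases hb : r < 0 ∨ c < 0 ∨ r ≥ row ∨ c ≥ col
    · have hg : r < 0 ∨ c < 0 ∨ r ≥ row ∨ c ≥ col ∨ pvCell g r c = "#" ∨ pvCell g r c = "Y" := by
        tauto
      simp [floodA, floodB, hb, hg]
    · by_cases hc : pvCell g r c = "#" ∨ pvCell g r c = "Y"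
      · have hg : r < 0 ∨ c < 0 ∨ r ≥ row ∨ c ≥ col ∨ pvCell g r c = "#" ∨ pvCell g r c = "Y" := by
          tauto
        simp [floodA, floodB, hb, hc]
      · have hg : ¬ (r < 0 ∨ c < 0 ∨ r ≥ row ∨ c ≥ col ∨ pvCell g r c = "#" ∨ pvCell g r c = "Y") := by
          tauto
        rw [floodB, floodA, if_neg hg, if_neg hb]
        simp only [if_neg hc]
        rw [ih]
        cases h1 : floodA f (pvSetCell g r c "Y") (r + 1) c row col with
        | none => simp
        | some p1 =>
          simp only [Option.bind_some]
          rw [ih]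
          cases h2 : floodA f p1.2 (r - 1) c row col with
          | none => simp
          | some p2 =>
            simp only [Option.bind_some]
            rw [ih]
            cases h3 : floodA f p2.2 r (c + 1) row col with
            | none => simp
            | some p3 =>
              simp only [Option.bind_some]
              rw [ih]
              cases h4 : floodA f p3.2 r (c - 1) row col with
              | none => simp
              | some p4 =>
                simp only [Option.bind_some]
                congr 1
                split_ifs <;> omega

-- A singleton stack computes exactly A's recursive flood.
theorem floodB_single (row col : Int) (f : Nat) (g : List (List String)) (r c : Int) :
    floodB g row col [(f, r, c)] 0 = floodA f g r c row col := by
  rw [floodB_cons]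
  cases h : floodA f g r c row col with
  | none => rfl
  | some p => simp [floodB]

theorem max_diamond_eq_alt (edges : List (List String)) (row col : Int) :
    max_diamond edges row col = max_diamond_alt edges row col := by
  simp only [max_diamond, max_diamond_alt, floodB_single]

-- ===== VERDICT (by name: the statement is the Claim_ definition above) =====
theorem max_diamond_spec : Claim_equal_max_diamond := by
  intro edges row col _ _
  unfold Spec_max_diamond
  exact max_diamond_eq_alt edges row col
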